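-- pv_equiv track=rewrite | github.com/Superbestron/CP-Journey | CP4/Mathematics/Adhoc/Polynomial/ada.py | recurse
-- ===== SOURCE A (Python) =====
-- def recurse(arr, ctr):
--     ctr += 1
--     if len(arr) == 1:
--         return arr[0] * 2, ctr
--     diff = arr[1] - arr[0]
--     can = True
--     temp = [diff]
--     for i in range(2, len(arr)):
--         diff_t = arr[i] - arr[i - 1]
--         if diff_t != diff:
--             can = False
--         temp.append(diff_t)
--     if can:
--         return arr[-1] + diff, ctr
--     else:
--         nxt, ctr = recurse(temp, ctr)
--         return arr[-1] + nxt, ctr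
-- ===== SOURCE B (Python) =====
-- def recurse(arr, ctr):
--     acc = 0
--     while True:
--         ctr += 1
--         if len(arr) == 1:
--             return acc + arr[0] * 2, ctr
--         temp = [arr[i + 1] - arr[i] for i in range(len(arr) - 1)]
--         diff = temp[0]
--         if all(t == diff for t in temp):
--             return acc + arr[-1] + diff, ctr
--         acc += arr[-1]
--         arr = temp
-- ===== Notes on version B (the rewrite author's own statement) =====
-- stated objective: alternative
-- what changed: Replaced the recursion with an iterative while-loop that keeps an accumulator of the last elements of each difference level and a running counter, building each level's differences with a comprehension and checking constancy with all().
-- outside the precondition, e.g. on recurse([], 0): A raises IndexError, B raises IndexError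
import Mathlib
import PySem

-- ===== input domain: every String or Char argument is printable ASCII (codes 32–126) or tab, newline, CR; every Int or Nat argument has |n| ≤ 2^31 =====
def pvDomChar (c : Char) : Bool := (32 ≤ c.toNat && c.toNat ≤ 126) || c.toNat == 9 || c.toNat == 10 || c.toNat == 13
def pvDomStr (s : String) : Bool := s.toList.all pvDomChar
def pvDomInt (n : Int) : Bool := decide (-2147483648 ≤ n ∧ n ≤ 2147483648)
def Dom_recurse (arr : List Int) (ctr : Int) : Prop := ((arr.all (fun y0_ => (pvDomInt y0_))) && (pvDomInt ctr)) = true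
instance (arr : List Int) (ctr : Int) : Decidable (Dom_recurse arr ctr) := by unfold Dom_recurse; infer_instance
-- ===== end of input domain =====

-- B replaces A's recursion by an iterative accumulator loop over the difference levels (objective: alternative decomposition, same cost); A = B is proved for nonempty arr (A raises IndexError on []).

-- ===== PORT A =====
-- A's inner for-loop (for i in range(2, len(arr))): walks the remaining elements,
-- carrying 'can' and appending each consecutive difference to 'temp'.
def loopA (diff : Int) (prev : Int) (rest : List Int) (can : Bool) (temp : List Int) :
    Bool × List Int :=
  match rest with
  | [] => (can, temp)
  | x :: xs => loopA diff x xs (if x - prev ≠ diff then false else can) (temp ++ [x - prev])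

theorem loopA_snd_length (diff : Int) : ∀ (rest : List Int) (prev : Int) (can : Bool) (temp : List Int),
    ((loopA diff prev rest can temp).2).length = temp.length + rest.length := by
  intro rest
  induction rest with
  | nil => intro prev can temp; simp [loopA]
  | cons x xs ih => intro prev can temp; simp [loopA, ih]; omega

-- port of A; arr[0], arr[-1] are exact on the nonempty lists Pre_ admits (List.getLastD arr 0 = arr[-1])
def recurse (arr : List Int) (ctr : Int) : Int × Int :=
  let ctr1 := ctr + 1
  match arr with
  | [] => (0, ctr1)            -- Python raises IndexError here; excluded by Pre_recurse
  | [a] => (a * 2, ctr1)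
  | a :: b :: rest =>
    let diff := b - a
    let p := loopA diff b rest true [diff]
    if p.1 then ((a :: b :: rest).getLastD 0 + diff, ctr1)
    else
      let q := recurse p.2 ctr1
      ((a :: b :: rest).getLastD 0 + q.1, q.2)
termination_by arr.length
decreasing_by simp [loopA_snd_length]; omega

-- ===== PORT B =====
-- the comprehension [arr[i+1] - arr[i] for i in range(len(arr)-1)]
def diffsB (prev : Int) (xs : List Int) : List Int :=
  match xs with
  | [] => []
  | x :: xs => (x - prev) :: diffsB x xs

theorem diffsB_length : ∀ (xs : List Int) (prev : Int), (diffsB prev xs).length = xs.length := by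
  intro xs
  induction xs with
  | nil => intro prev; simp [diffsB]
  | cons x xs ih => intro prev; simp [diffsB, ih]

-- the while-loop of Source B: state (arr, ctr, acc); arr[0], arr[-1], temp[0] exact on nonempty lists
def goB (arr : List Int) (ctr : Int) (acc : Int) : Int × Int :=
  let ctr1 := ctr + 1
  match arr with
  | [] => (acc, ctr1)          -- Python raises IndexError (temp[0]); excluded by Pre_recurse
  | [a] => (acc + a * 2, ctr1)
  | a :: b :: rest =>
    let temp := diffsB a (b :: rest)
    let diff := temp.headD 0
    if temp.all (fun t => t == diff) then (acc + (a :: b :: rest).getLastD 0 + diff, ctr1)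
    else goB temp ctr1 (acc + (a :: b :: rest).getLastD 0)
termination_by arr.length
decreasing_by simp [diffsB, diffsB_length]

def recurse_alt (arr : List Int) (ctr : Int) : Int × Int := goB arr ctr 0

-- ===== PRECONDITION & SPEC =====
-- Pre_ excludes only the empty list, on which both Pythons raise IndexError.
def Pre_recurse (arr : List Int) (ctr : Int) : Prop := arr ≠ []
instance (arr : List Int) (ctr : Int) : Decidable (Pre_recurse arr ctr) := by unfold Pre_recurse; infer_instance
def pvWitness_recurse : List Int × Int := ([1, 2, 4, 8], 0)

def Spec_recurse (arr : List Int) (ctr : Int) (out : Int × Int) : Prop := out = recurse_alt arr ctr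
instance (arr : List Int) (ctr : Int) (out : Int × Int) : Decidable (Spec_recurse arr ctr out) := by unfold Spec_recurse; infer_instance

-- ===== CLAIM (what is proved, stated in full; the proofs are below) =====
def Claim_equal_recurse : Prop := ∀ (arr : List Int) (ctr : Int), Dom_recurse arr ctr → Pre_recurse arr ctr → Spec_recurse arr ctr (recurse arr ctr)

-- ===== LEMMAS AND PROOFS =====

theorem loopA_eq (diff : Int) : ∀ (rest : List Int) (prev : Int) (can : Bool) (temp : List Int),
    loopA diff prev rest can temp =
      (can && (diffsB prev rest).all (fun t => t == diff), temp ++ diffsB prev rest) := by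
  intro rest
  induction rest with
  | nil => intro prev can temp; simp [loopA, diffsB]
  | cons x xs ih =>
    intro prev can temp
    simp only [loopA, diffsB, ih, List.all_cons, List.append_assoc, List.cons_append,
      List.nil_append, Prod.mk.injEq, and_true]
    by_cases h : x - prev = diff <;> simp [h] <;> cases can

-- main invariant: the loop of B computes A's result shifted by acc
theorem goB_eq : ∀ (n : Nat) (arr : List Int), arr.length ≤ n → arr ≠ [] →
    ∀ (ctr acc : Int),
    goB arr ctr acc = (acc + (recurse arr ctr).1, (recurse arr ctr).2) := by
  intro n
  induction n with
  | zero => intro arr h hne; cases arr <;> simp at h hne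
  | succ n ih =>
    intro arr h hne ctr acc
    match arr with
    | [] => exact absurd rfl hne
    | [a] => simp [goB, recurse]
    | a :: b :: rest =>
      have hA : recurse (a :: b :: rest) ctr =
          (let p := loopA (b - a) b rest true [b - a]
           if p.1 then ((a :: b :: rest).getLastD 0 + (b - a), ctr + 1)
           else
             let q := recurse p.2 (ctr + 1)
             ((a :: b :: rest).getLastD 0 + q.1, q.2)) := by
        rw [recurse]
      rw [loopA_eq] at hA
      simp only [Bool.true_and, List.cons_append, List.nil_append] at hA
      have hB : goB (a :: b :: rest) ctr acc =
          (let temp := diffsB a (b :: rest)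
           let diff := temp.headD 0
           if temp.all (fun t => t == diff) then
             (acc + (a :: b :: rest).getLastD 0 + diff, ctr + 1)
           else goB temp (ctr + 1) (acc + (a :: b :: rest).getLastD 0)) := by
        rw [goB]
      simp only [diffsB, List.headD_cons, List.all_cons, beq_self_eq_true, Bool.true_and] at hB
      by_cases hc : (diffsB b rest).all (fun t => t == b - a)
      · rw [hA, hB]
        simp [hc]
        ring
      · rw [hA, hB]
        simp only [hc, if_neg, Bool.false_eq_true, not_false_eq_true]
        have hlen : ((b - a) :: diffsB b rest).length ≤ n := by
          simp at h ⊢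
          have := diffsB_length rest b
          omega
        rw [ih ((b - a) :: diffsB b rest) hlen (by simp) (ctr + 1)
            (acc + (a :: b :: rest).getLastD 0)]
        rw [Prod.mk.injEq]
        exact ⟨by ring, rfl⟩

-- ===== VERDICT (by name: the statement is the Claim_ definition above) =====
theorem recurse_spec : Claim_equal_recurse := by
  intro arr ctr _ hpre
  unfold Spec_recurse recurse_alt
  rw [goB_eq arr.length arr le_rfl hpre ctr 0]
  simp
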